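-- pv_equiv track=rewrite | github.com/mayur75584/GeeksForGeeks | GeeksforGeeks/162(Length Unsorted Subarray).py | printUnsorted
-- ===== SOURCE A (Python) =====
-- def printUnsorted(arr,n):
--     if len(arr) == 1:
--         x = []
--         x.append(0)
--         x.append(0)
--         return x
--     z = []
--     arr1 = sorted(arr)
--     for i in range(len(arr)):
--         if arr[i] != arr1[i]:
--             z.append(i)
--
--     x = []
--     x.append(min(z))
--     x.append(max(z))
--     return x
-- ===== SOURCE B (Python) =====
-- def printUnsorted(arr, n):
--     # O(n): scan from the right with a running suffix-minimum to find the
--     # leftmost element bigger than something after it, then from the left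
--     # with a running prefix-maximum to find the rightmost element smaller
--     # than something before it.  No sorting.
--     m = len(arr)
--     if m <= 1:
--         return [0, 0]
--     lo = -1
--     mn = arr[m - 1]
--     for i in range(m - 2, -1, -1):
--         if arr[i + 1] < mn:
--             mn = arr[i + 1]
--         if arr[i] > mn:
--             lo = i
--     if lo == -1:
--         return [0, 0]
--     hi = 0
--     mx = arr[0]
--     for i in range(1, m):
--         if arr[i] < mx:
--             hi = i
--         else:
--             mx = arr[i]
--     return [lo, hi]
-- ===== Notes on version B (the rewrite author's own statement) =====
-- stated objective: faster
-- what changed: Instead of sorting a copy and collecting all indices where arr differs from the sorted copy, B finds the window bounds in two linear scans: a right-to-left scan with a running suffix minimum gives the leftmost index whose element exceeds something after it, and a left-to-right scan with a running prefix maximum gives the rightmost index whose element is below something before it.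
import Mathlib
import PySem

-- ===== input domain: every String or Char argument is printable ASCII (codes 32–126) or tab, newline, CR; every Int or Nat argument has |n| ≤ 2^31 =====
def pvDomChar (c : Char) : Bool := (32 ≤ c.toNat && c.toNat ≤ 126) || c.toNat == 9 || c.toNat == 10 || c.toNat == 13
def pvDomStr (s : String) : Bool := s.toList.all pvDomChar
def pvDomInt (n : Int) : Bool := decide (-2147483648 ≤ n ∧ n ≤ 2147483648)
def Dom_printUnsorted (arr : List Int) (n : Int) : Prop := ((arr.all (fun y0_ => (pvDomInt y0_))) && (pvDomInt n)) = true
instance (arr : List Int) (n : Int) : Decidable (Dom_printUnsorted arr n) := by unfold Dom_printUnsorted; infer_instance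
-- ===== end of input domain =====

-- B replaces A's sort-and-compare with two linear scans (suffix-minimum, then prefix-maximum); objective: faster.

-- ===== PORT A =====
-- helper: the loop collecting the indices where arr differs from sorted(arr) (A's z; arr1 inlined)
def mismatchIdx (arr : List Int) : List Int :=
  (PySem.List.pyRange 0 (arr.length : Int) 1).foldl
    (fun z i => if PySem.List.pyGet? arr i ≠
        PySem.List.pyGet? (PySem.List.sorted arr (fun x => x) false) i then z ++ [i] else z) []

def printUnsorted (arr : List Int) (n : Int) : List Int :=
  if arr.length == 1 then [0, 0]
  else
    match PySem.List.min? (mismatchIdx arr) (fun x => x),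
          PySem.List.max? (mismatchIdx arr) (fun x => x) with
    | some a, some b => [a, b]
    | _, _ => []


-- ===== PORT B =====
-- helpers: the two scan loops of B (step function + its fold), kept as named helpers
def step1 (arr : List Int) (st : Int × Int) (i : Int) : Int × Int :=
  let mn := if PySem.List.pyGetD arr (i + 1) 0 < st.2 then PySem.List.pyGetD arr (i + 1) 0 else st.2
  (if mn < PySem.List.pyGetD arr i 0 then i else st.1, mn)

def step2 (arr : List Int) (st : Int × Int) (i : Int) : Int × Int :=
  if PySem.List.pyGetD arr i 0 < st.2 then (i, st.2) else (st.1, PySem.List.pyGetD arr i 0)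

def loop1 (arr : List Int) : Int × Int :=
  (PySem.List.pyRange ((arr.length : Int) - 2) (-1) (-1)).foldl (step1 arr)
    (-1, PySem.List.pyGetD arr ((arr.length : Int) - 1) 0)

def loop2 (arr : List Int) : Int × Int :=
  (PySem.List.pyRange 1 (arr.length : Int)).foldl (step2 arr) (0, PySem.List.pyGetD arr 0 0)

def printUnsorted_alt (arr : List Int) (n : Int) : List Int :=
  if (arr.length : Int) ≤ 1 then [0, 0]
  else if (loop1 arr).1 == -1 then [0, 0]
  else [(loop1 arr).1, (loop2 arr).1]

-- ===== PRECONDITION & SPEC =====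
-- Pre_ excludes exactly the inputs on which A raises ValueError (min()/max() of the empty
-- mismatch list z): already-nondecreasing arrays of length ≠ 1, including the empty list.
def Pre_printUnsorted (arr : List Int) (n : Int) : Prop :=
  arr.length = 1 ∨ ¬ List.Pairwise (· ≤ ·) arr
instance (arr : List Int) (n : Int) : Decidable (Pre_printUnsorted arr n) := by
  unfold Pre_printUnsorted; infer_instance
def pvWitness_printUnsorted : List Int × Int := ([3, 1, 2], 3)

def Spec_printUnsorted (arr : List Int) (n : Int) (out : List Int) : Prop := out = printUnsorted_alt arr n
instance (arr : List Int) (n : Int) (out : List Int) : Decidable (Spec_printUnsorted arr n out) := by unfold Spec_printUnsorted; infer_instance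

-- ===== CLAIM (what is proved, stated in full; the proofs are below) =====
def Claim_equal_printUnsorted : Prop := ∀ (arr : List Int) (n : Int), Dom_printUnsorted arr n → Pre_printUnsorted arr n → Spec_printUnsorted arr n (printUnsorted arr n)

-- ===== LEMMAS AND PROOFS =====
lemma sorted_split_low (arr : List Int) (L : Nat) (hL : L ≤ arr.length)
    (h : ∀ k j, k < L → k < j → j < arr.length → arr.getD k 0 ≤ arr.getD j 0) :
    PySem.List.sorted arr (fun x => x) false
      = arr.take L ++ PySem.List.sorted (arr.drop L) (fun x => x) false := by
  apply PySem.List.sorted_id_eq_of_perm_of_pairwise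
  · have h1 : (arr.take L ++ PySem.List.sorted (arr.drop L) (fun x => x) false).Perm
        (arr.take L ++ arr.drop L) := List.Perm.append_left _ (PySem.List.sorted_perm _ _ _)
    have h2 : arr.take L ++ arr.drop L = arr := List.take_append_drop L arr
    rw [h2] at h1; exact h1
  · rw [List.pairwise_append]
    refine ⟨?_, ?_, ?_⟩
    · rw [List.pairwise_iff_getElem]
      intro p q hp hq hpq
      have hlt : (arr.take L).length = min L arr.length := List.length_take
      simp only [List.getElem_take]
      have hpL : p < L := by omega
      have hqL : q < arr.length := by rw [hlt] at hq; omega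
      have := h p q hpL hpq hqL
      rwa [List.getD_eq_getElem _ _ (by omega : p < arr.length), List.getD_eq_getElem _ _ hqL] at this
    · simpa using PySem.List.sorted_pairwise (arr.drop L) (fun x => x)
    · intro x hx y hy
      have hy' : y ∈ arr.drop L := (PySem.List.mem_sorted _ _ _ _).mp hy
      obtain ⟨p, hp, hxp⟩ := List.mem_take_iff_getElem.mp hx
      have hp2 : p < L := by omega
      have hp3 : p < arr.length := by omega
      obtain ⟨q, hq, hyq⟩ := List.mem_iff_getElem.mp hy'
      rw [List.getElem_drop] at hyq
      have hq' : L + q < arr.length := by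
        have := List.length_drop (l := arr) (i := L); omega
      have := h p (L + q) hp2 (by omega) hq'
      rw [List.getD_eq_getElem _ _ hp3, List.getD_eq_getElem _ _ hq'] at this
      subst hxp hyq; exact this

lemma sorted_split_high (arr : List Int) (H : Nat) (hH : H < arr.length)
    (h : ∀ k j, H < j → k < j → j < arr.length → arr.getD k 0 ≤ arr.getD j 0) :
    PySem.List.sorted arr (fun x => x) false
      = PySem.List.sorted (arr.take (H+1)) (fun x => x) false ++ arr.drop (H+1) := by
  apply PySem.List.sorted_id_eq_of_perm_of_pairwise
  · have h1 : (PySem.List.sorted (arr.take (H+1)) (fun x => x) false ++ arr.drop (H+1)).Perm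
        (arr.take (H+1) ++ arr.drop (H+1)) :=
      List.Perm.append_right _ (PySem.List.sorted_perm _ _ _)
    have h2 : arr.take (H+1) ++ arr.drop (H+1) = arr := List.take_append_drop _ arr
    rw [h2] at h1; exact h1
  · rw [List.pairwise_append]
    refine ⟨?_, ?_, ?_⟩
    · simpa using PySem.List.sorted_pairwise (arr.take (H+1)) (fun x => x)
    · rw [List.pairwise_iff_getElem]
      intro p q hp hq hpq
      simp only [List.getElem_drop]
      have hl : (arr.drop (H+1)).length = arr.length - (H+1) := List.length_drop
      have hq' : H + 1 + q < arr.length := by omega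
      have := h (H + 1 + p) (H + 1 + q) (by omega) (by omega) hq'
      rwa [List.getD_eq_getElem _ _ (by omega : H + 1 + p < arr.length),
           List.getD_eq_getElem _ _ hq'] at this
    · intro x hx y hy
      have hx' : x ∈ arr.take (H+1) := (PySem.List.mem_sorted _ _ _ _).mp hx
      obtain ⟨p, hp, hxp⟩ := List.mem_take_iff_getElem.mp hx'
      obtain ⟨q, hq, hyq⟩ := List.mem_iff_getElem.mp hy
      rw [List.getElem_drop] at hyq
      have hl : (arr.drop (H+1)).length = arr.length - (H+1) := List.length_drop
      have hq' : H + 1 + q < arr.length := by omega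
      have hp3 : p < arr.length := by omega
      have := h p (H + 1 + q) (by omega) (by omega) hq'
      rw [List.getD_eq_getElem _ _ hp3, List.getD_eq_getElem _ _ hq'] at this
      subst hxp hyq; exact this
def Bad (arr : List Int) (i : Nat) : Prop :=
  ∃ j, j < arr.length ∧ i < j ∧ arr.getD j 0 < arr.getD i 0
def Up (arr : List Int) (i : Nat) : Prop :=
  ∃ j, j < i ∧ arr.getD i 0 < arr.getD j 0

lemma low_h (arr : List Int) (L : Nat) (hminL : ∀ k, k < L → ¬ Bad arr k) :
    ∀ k j, k < L → k < j → j < arr.length → arr.getD k 0 ≤ arr.getD j 0 := by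
  intro k j hk hkj hj
  by_contra hlt
  exact hminL k hk ⟨j, hj, hkj, by omega⟩

lemma high_h (arr : List Int) (H : Nat) (hmaxH : ∀ k, H < k → k < arr.length → ¬ Up arr k) :
    ∀ k j, H < j → k < j → j < arr.length → arr.getD k 0 ≤ arr.getD j 0 := by
  intro k j hHj hkj hj
  by_contra hlt
  exact hmaxH j hHj hj ⟨k, hkj, by omega⟩

lemma sa_eq_below (arr : List Int) (L : Nat) (hL : L ≤ arr.length)
    (hminL : ∀ k, k < L → ¬ Bad arr k) :
    ∀ k, k < L → (PySem.List.sorted arr (fun x => x) false).getD k 0 = arr.getD k 0 := by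
  intro k hk
  rw [sorted_split_low arr L hL (low_h arr L hminL)]
  have hlen : (arr.take L).length = L := by simp [List.length_take]; omega
  rw [List.getD_append _ _ _ _ (by omega)]
  rw [List.getD_eq_getElem _ _ (by omega), List.getD_eq_getElem _ _ (by omega : k < arr.length),
      List.getElem_take]

lemma sa_lt_at (arr : List Int) (L : Nat) (hLm : L < arr.length)
    (hbadL : Bad arr L) (hminL : ∀ k, k < L → ¬ Bad arr k) :
    (PySem.List.sorted arr (fun x => x) false).getD L 0 < arr.getD L 0 := by
  rw [sorted_split_low arr L (by omega) (low_h arr L hminL)]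
  have hlen : (arr.take L).length = L := by simp [List.length_take]; omega
  rw [List.getD_append_right _ _ _ _ (by omega)]
  have hne : arr.drop L ≠ [] := by
    intro hnil
    have := List.length_drop (l := arr) (i := L)
    rw [hnil] at this; simp at this; omega
  have hsne : PySem.List.sorted (arr.drop L) (fun x => x) false ≠ [] := by
    rw [Ne, PySem.List.sorted_eq_nil_iff]; exact hne
  obtain ⟨c, rest, hcrest⟩ := List.exists_cons_of_ne_nil hsne
  rw [hcrest, hlen]
  simp only [Nat.sub_self, List.getD_cons_zero]
  have hhead := PySem.List.key_head_sorted_le (xs := arr.drop L) (key := fun x => x) hcrest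
  obtain ⟨j, hj, hLj, hval⟩ := hbadL
  have hmem : arr.getD j 0 ∈ arr.drop L := by
    rw [List.getD_eq_getElem _ _ hj]
    have : arr[j] = (arr.drop L)[j - L]'(by simp [List.length_drop]; omega) := by
      rw [List.getElem_drop]; congr 1; omega
    rw [this]; exact List.getElem_mem _
  have h2 : c ≤ arr.getD j 0 := hhead _ hmem
  omega

lemma sa_eq_above (arr : List Int) (H : Nat) (hH : H < arr.length)
    (hmaxH : ∀ k, H < k → k < arr.length → ¬ Up arr k) :
    ∀ k, H < k → (PySem.List.sorted arr (fun x => x) false).getD k 0 = arr.getD k 0 := by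
  intro k hk
  rw [sorted_split_high arr H hH (high_h arr H hmaxH)]
  have hlen : (PySem.List.sorted (arr.take (H+1)) (fun x => x) false).length = H + 1 := by
    rw [PySem.List.length_sorted, List.length_take]; omega
  by_cases hkm : k < arr.length
  · rw [List.getD_append_right _ _ _ _ (by omega)]
    rw [hlen, List.getD_eq_getElem _ _ (by simp [List.length_drop]; omega),
        List.getD_eq_getElem _ _ hkm, List.getElem_drop]
    congr 1; omega
  · have htot : (PySem.List.sorted (arr.take (H+1)) (fun x => x) false ++ arr.drop (H+1)).length
        = arr.length := by
      rw [List.length_append, hlen, List.length_drop]; omega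
    rw [List.getD_eq_default _ _ (by omega), List.getD_eq_default _ _ (by omega)]

lemma sa_gt_at (arr : List Int) (H : Nat) (hH : H < arr.length)
    (hupH : Up arr H) (hmaxH : ∀ k, H < k → k < arr.length → ¬ Up arr k) :
    arr.getD H 0 < (PySem.List.sorted arr (fun x => x) false).getD H 0 := by
  rw [sorted_split_high arr H hH (high_h arr H hmaxH)]
  have hlen : (PySem.List.sorted (arr.take (H+1)) (fun x => x) false).length = H + 1 := by
    rw [PySem.List.length_sorted, List.length_take]; omega
  rw [List.getD_append _ _ _ _ (by omega)]
  obtain ⟨j, hjH, hval⟩ := hupH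
  have hmem : arr.getD j 0 ∈ PySem.List.sorted (arr.take (H+1)) (fun x => x) false := by
    rw [PySem.List.mem_sorted]
    rw [List.getD_eq_getElem _ _ (by omega : j < arr.length)]
    exact List.mem_take_iff_getElem.mpr ⟨j, by omega, rfl⟩
  obtain ⟨p, hp, hpv⟩ := List.mem_iff_getElem.mp hmem
  have hmono := PySem.List.sorted_id_getElem_mono (xs := arr.take (H+1))
      (p := p) (q := H) (by omega) (by omega)
  rw [List.getD_eq_getElem _ _ (by omega : H < (PySem.List.sorted (arr.take (H+1)) (fun x => x) false).length)]
  omega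
lemma mismatchIdx_eq_filter (arr : List Int) :
    mismatchIdx arr = (PySem.List.pyRange 0 (arr.length : Int) 1).filter
      (fun i => decide (PySem.List.pyGet? arr i ≠
        PySem.List.pyGet? (PySem.List.sorted arr (fun x => x) false) i)) := by
  unfold mismatchIdx
  have := PySem.List.foldl_append_if
    (fun i => decide (PySem.List.pyGet? arr i ≠
      PySem.List.pyGet? (PySem.List.sorted arr (fun x => x) false) i))
    (fun (x : Int) => x)
    (PySem.List.pyRange 0 (arr.length : Int) 1) []
  simp only [decide_eq_true_eq, List.map_id', List.nil_append] at this
  exact this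

lemma mem_mismatchIdx (arr : List Int) (i : Int) :
    i ∈ mismatchIdx arr ↔ ∃ k : Nat, i = (k : Int) ∧ k < arr.length ∧
      arr.getD k 0 ≠ (PySem.List.sorted arr (fun x => x) false).getD k 0 := by
  rw [mismatchIdx_eq_filter, List.mem_filter]
  constructor
  · rintro ⟨hmem, hp⟩
    rw [PySem.List.mem_pyRange_one] at hmem
    obtain ⟨h0, hm⟩ := hmem
    refine ⟨i.toNat, by omega, by omega, ?_⟩
    rw [decide_eq_true_eq] at hp
    intro he; apply hp
    have hi : i = ((i.toNat : Nat) : Int) := by omega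
    rw [hi, PySem.List.pyGet?_natCast, PySem.List.pyGet?_natCast]
    have h1 : i.toNat < arr.length := by omega
    have h2 : i.toNat < (PySem.List.sorted arr (fun x => x) false).length := by
      rw [PySem.List.length_sorted]; omega
    rw [List.getElem?_eq_getElem h1, List.getElem?_eq_getElem h2]
    rw [List.getD_eq_getElem _ _ h1, List.getD_eq_getElem _ _ h2] at he
    exact congrArg some he
  · rintro ⟨k, rfl, hk, hne⟩
    constructor
    · rw [PySem.List.mem_pyRange_one]; omega
    · rw [decide_eq_true_eq]
      have h2 : k < (PySem.List.sorted arr (fun x => x) false).length := by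
        rw [PySem.List.length_sorted]; omega
      rw [PySem.List.pyGet?_natCast, PySem.List.pyGet?_natCast,
          List.getElem?_eq_getElem hk, List.getElem?_eq_getElem h2]
      intro he
      apply hne
      rw [List.getD_eq_getElem _ _ hk, List.getD_eq_getElem _ _ h2]
      exact Option.some.inj he

lemma keyA (arr : List Int) (n : Int) (hm : 2 ≤ arr.length) (L H : Nat)
    (hLm : L < arr.length) (hHm : H < arr.length)
    (hbadL : Bad arr L) (hminL : ∀ k, k < L → ¬ Bad arr k)
    (hupH : Up arr H) (hmaxH : ∀ k, H < k → k < arr.length → ¬ Up arr k) :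
    printUnsorted arr n = [(L : Int), (H : Int)] := by
  have hLmem : (L : Int) ∈ mismatchIdx arr := by
    rw [mem_mismatchIdx]
    exact ⟨L, rfl, hLm, by have := sa_lt_at arr L hLm hbadL hminL; omega⟩
  have hHmem : (H : Int) ∈ mismatchIdx arr := by
    rw [mem_mismatchIdx]
    exact ⟨H, rfl, hHm, by have := sa_gt_at arr H hHm hupH hmaxH; omega⟩
  have hbound : ∀ x ∈ mismatchIdx arr, (L : Int) ≤ x ∧ x ≤ (H : Int) := by
    intro x hx
    rw [mem_mismatchIdx] at hx
    obtain ⟨k, rfl, hk, hne⟩ := hx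
    constructor
    · by_contra hlt
      exact hne (sa_eq_below arr L (by omega) hminL k (by omega)).symm
    · by_contra hlt
      exact hne (sa_eq_above arr H hHm hmaxH k (by omega)).symm
  have hne : mismatchIdx arr ≠ [] := by
    intro h; rw [h] at hLmem; exact absurd hLmem (List.not_mem_nil)
  obtain ⟨a, ha⟩ : ∃ a, PySem.List.min? (mismatchIdx arr) (fun x => x) = some a := by
    cases hmin : PySem.List.min? (mismatchIdx arr) (fun x => x) with
    | none => exact absurd ((PySem.List.min?_eq_none_iff _ _).mp hmin) hne
    | some a => exact ⟨a, rfl⟩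
  obtain ⟨b, hb⟩ : ∃ b, PySem.List.max? (mismatchIdx arr) (fun x => x) = some b := by
    cases hmax : PySem.List.max? (mismatchIdx arr) (fun x => x) with
    | none => exact absurd ((PySem.List.max?_eq_none_iff _ _).mp hmax) hne
    | some b => exact ⟨b, rfl⟩
  have haL : a = (L : Int) := by
    have h1 : a ≤ (L : Int) := PySem.List.min?_isMin ha _ hLmem
    have h2 := (hbound a (PySem.List.min?_mem ha)).1
    omega
  have hbH : b = (H : Int) := by
    have h1 : (H : Int) ≤ b := PySem.List.max?_isMax hb _ hHmem
    have h2 := (hbound b (PySem.List.max?_mem hb)).2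
    omega
  unfold printUnsorted
  rw [if_neg (by simp; omega)]
  rw [ha, hb, haL, hbH]
def Inv1 (arr : List Int) (a : Nat) (st : Int × Int) : Prop :=
  (∀ j : Nat, a < j → j < arr.length → st.2 ≤ arr.getD j 0) ∧
  (∃ j : Nat, a ≤ j ∧ j < arr.length ∧ st.2 = arr.getD j 0) ∧
  ((st.1 = -1 ∧ ∀ i : Nat, a ≤ i → i < arr.length → ¬ Bad arr i) ∨
   (∃ i : Nat, st.1 = (i : Int) ∧ a ≤ i ∧ i < arr.length ∧ Bad arr i ∧
      ∀ k : Nat, a ≤ k → k < i → ¬ Bad arr k))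

def Inv2 (arr : List Int) (b : Nat) (st : Int × Int) : Prop :=
  (∀ j : Nat, j < b → arr.getD j 0 ≤ st.2) ∧
  (∃ j : Nat, j < b ∧ st.2 = arr.getD j 0) ∧
  ((st.1 = 0 ∧ ∀ i : Nat, i < b → ¬ Up arr i) ∨
   (∃ i : Nat, st.1 = (i : Int) ∧ i < b ∧ Up arr i ∧ ∀ k : Nat, i < k → k < b → ¬ Up arr k))

lemma step1_eq (arr : List Int) (st : Int × Int) (i : Int) :
    step1 arr st i =
      (if (if PySem.List.pyGetD arr (i + 1) 0 < st.2 then PySem.List.pyGetD arr (i + 1) 0 else st.2)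
            < PySem.List.pyGetD arr i 0 then i else st.1,
       if PySem.List.pyGetD arr (i + 1) 0 < st.2 then PySem.List.pyGetD arr (i + 1) 0 else st.2) := rfl

lemma loop1_inv (arr : List Int) (hm : 2 ≤ arr.length) :
    ∀ (fuel a : Nat), arr.length - 1 - a = fuel → a ≤ arr.length - 1 →
    Inv1 arr a ((PySem.List.pyRange (a : Int) ((arr.length : Int) - 1)).foldr
      (fun i st => step1 arr st i) (-1, arr.getD (arr.length - 1) 0)) := by
  intro fuel
  induction fuel with
  | zero =>
    intro a hfa ha
    rw [PySem.List.pyRange_one_eq_nil (by omega)]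
    simp only [List.foldr_nil]
    refine ⟨?_, ⟨arr.length - 1, by omega, by omega, rfl⟩, Or.inl ⟨rfl, ?_⟩⟩
    · intro j hj1 hj2; omega
    · intro i hi1 hi2 ⟨j, hj1, hj2, _⟩; omega
  | succ f ih =>
    intro a hfa ha
    have halt : a < arr.length - 1 := by omega
    rw [PySem.List.pyRange_one_cons (by omega)]
    simp only [List.foldr_cons]
    rw [step1_eq, show ((a : Int)) + 1 = ((a + 1 : Nat) : Int) by push_cast; ring]
    simp only [PySem.List.pyGetD_natCast]
    obtain ⟨h1, ⟨j0, hj0a, hj0m, hj0v⟩, h3⟩ := ih (a + 1) (by omega) (by omega)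
    set st2 := (PySem.List.pyRange ((a + 1 : Nat) : Int) ((arr.length : Int) - 1)).foldr
      (fun i st => step1 arr st i) (-1, arr.getD (arr.length - 1) 0) with hst2
    set mn := if arr.getD (a + 1) 0 < st2.2 then arr.getD (a + 1) 0 else st2.2 with hmn
    have hmn_le : ∀ j : Nat, a < j → j < arr.length → mn ≤ arr.getD j 0 := by
      intro j hj1 hj2
      rcases Nat.eq_or_lt_of_le hj1 with he | hl
      · have he2 : j = a + 1 := by omega
        subst he2
        rw [hmn]; split_ifs with hc <;> omega
      · have := h1 j (by omega) hj2
        rw [hmn]; split_ifs with hc <;> omega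
    have hmn_mem : ∃ j : Nat, a < j ∧ j < arr.length ∧ mn = arr.getD j 0 := by
      rw [hmn]; split_ifs with hc
      · exact ⟨a + 1, by omega, by omega, rfl⟩
      · exact ⟨j0, by omega, hj0m, hj0v⟩
    refine ⟨fun j hj1 hj2 => hmn_le j hj1 hj2, ?_, ?_⟩
    · obtain ⟨j, hj1, hj2, hj3⟩ := hmn_mem
      exact ⟨j, by omega, hj2, hj3⟩
    · dsimp only
      split_ifs with hcond
      · right
        obtain ⟨j, hj1, hj2, hj3⟩ := hmn_mem
        exact ⟨a, rfl, le_refl a, by omega, ⟨j, hj2, hj1, by omega⟩, fun k hk1 hk2 => by omega⟩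
      · have hnotbad : ¬ Bad arr a := by
          rintro ⟨j, hjm, hja, hjv⟩
          have := hmn_le j hja hjm
          omega
        rcases h3 with ⟨hl, hall⟩ | ⟨i, hi1, hi2, hi3, hi4, hi5⟩
        · left
          refine ⟨hl, fun i hi1 hi2 => ?_⟩
          rcases Nat.eq_or_lt_of_le hi1 with he | hlt
          · have he2 : i = a := by omega
            subst he2; exact hnotbad
          · exact hall i (by omega) hi2
        · right
          refine ⟨i, hi1, by omega, hi3, hi4, fun k hk1 hk2 => ?_⟩
          rcases Nat.eq_or_lt_of_le hk1 with he | hlt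
          · have he2 : k = a := by omega
            subst he2; exact hnotbad
          · exact hi5 k (by omega) hk2
lemma loop2_inv (arr : List Int) (_hm : 1 ≤ arr.length) :
    ∀ (b : Nat), 1 ≤ b → b ≤ arr.length →
    Inv2 arr b ((PySem.List.pyRange 1 (b : Int)).foldl (step2 arr) (0, arr.getD 0 0)) := by
  intro b
  induction b with
  | zero => intro h; omega
  | succ b ih =>
    intro _ hble
    by_cases hb1 : b = 0
    · subst hb1
      rw [PySem.List.pyRange_one_eq_nil (by omega)]
      simp only [List.foldl_nil]
      refine ⟨?_, ⟨0, by omega, rfl⟩, Or.inl ⟨rfl, ?_⟩⟩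
      · intro j hj
        have hj0 : j = 0 := by omega
        subst hj0; exact le_refl _
      · intro i hi ⟨j, hj1, hj2⟩; omega
    · have hb : 1 ≤ b := by omega
      rw [show ((b + 1 : Nat) : Int) = (b : Int) + 1 by push_cast; ring,
          PySem.List.pyRange_one_succ_right (by omega), List.foldl_append]
      simp only [List.foldl_cons, List.foldl_nil]
      obtain ⟨h1, ⟨j0, hj0b, hj0v⟩, h3⟩ := ih hb (by omega)
      set st2 := (PySem.List.pyRange 1 (b : Int)).foldl (step2 arr) (0, arr.getD 0 0) with hst2
      unfold step2
      rw [PySem.List.pyGetD_natCast]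
      split_ifs with hcond
      · -- arr[b] < mx : b is Up, becomes the new hi
        have hupb : Up arr b := ⟨j0, hj0b, by omega⟩
        refine ⟨?_, ⟨j0, by omega, hj0v⟩, Or.inr ⟨b, rfl, by omega, hupb, fun k hk1 hk2 => by omega⟩⟩
        · intro j hj
          rcases Nat.lt_succ_iff_lt_or_eq.mp hj with h | h
          · exact h1 j h
          · subst h; omega
      · -- mx ≤ arr[b] : b is not Up, mx := arr[b]
        have hnotup : ¬ Up arr b := by
          rintro ⟨j, hj1, hj2⟩
          have := h1 j hj1
          omega
        refine ⟨?_, ⟨b, by omega, rfl⟩, ?_⟩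
        · intro j hj
          rcases Nat.lt_succ_iff_lt_or_eq.mp hj with h | h
          · have := h1 j h; omega
          · subst h; exact le_refl _
        · rcases h3 with ⟨hl, hall⟩ | ⟨i, hi1, hi2, hi3, hi4⟩
          · left
            refine ⟨hl, fun i hi => ?_⟩
            rcases Nat.lt_succ_iff_lt_or_eq.mp hi with h | h
            · exact hall i h
            · subst h; exact hnotup
          · right
            refine ⟨i, hi1, by omega, hi3, fun k hk1 hk2 => ?_⟩
            rcases Nat.lt_succ_iff_lt_or_eq.mp hk2 with h | h
            · exact hi4 k hk1 h
            · subst h; exact hnotup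
lemma loop1_eq_foldr (arr : List Int) (hm : 2 ≤ arr.length) :
    loop1 arr = (PySem.List.pyRange ((0 : Nat) : Int) ((arr.length : Int) - 1)).foldr
      (fun i st => step1 arr st i) (-1, arr.getD (arr.length - 1) 0) := by
  unfold loop1
  rw [PySem.List.pyRange_neg_one_eq_reverse, List.foldl_reverse]
  rw [show (-1 : Int) + 1 = ((0 : Nat) : Int) by norm_num,
      show ((arr.length : Int) - 2) + 1 = (arr.length : Int) - 1 by ring,
      show ((arr.length : Int) - 1) = ((arr.length - 1 : Nat) : Int) by omega,
      PySem.List.pyGetD_natCast]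

lemma keyB (arr : List Int) (n : Int) (hm : 2 ≤ arr.length) (L H : Nat)
    (hLm : L < arr.length) (hHm : H < arr.length)
    (hbadL : Bad arr L) (hminL : ∀ k, k < L → ¬ Bad arr k)
    (hupH : Up arr H) (hmaxH : ∀ k, H < k → k < arr.length → ¬ Up arr k) :
    printUnsorted_alt arr n = [(L : Int), (H : Int)] := by
  have hinv1 : Inv1 arr 0 (loop1 arr) := by
    rw [loop1_eq_foldr arr hm]
    exact loop1_inv arr hm (arr.length - 1) 0 (by omega) (by omega)
  have hinv2 : Inv2 arr arr.length (loop2 arr) := by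
    have := loop2_inv arr (by omega) arr.length (by omega) (le_refl _)
    unfold loop2
    rw [PySem.List.pyGetD_zero]
    exact this
  obtain ⟨_, _, h3⟩ := hinv1
  rcases h3 with ⟨_, hall⟩ | ⟨i, hi1, _, hi3, hi4, hi5⟩
  · exact absurd hbadL (hall L (by omega) hLm)
  · have hiL : i = L := by
      by_contra hne
      rcases Nat.lt_or_ge i L with h | h
      · exact hminL i h hi4
      · exact hi5 L (by omega) (by omega) hbadL
    subst hiL
    obtain ⟨_, _, h6⟩ := hinv2
    rcases h6 with ⟨_, hall2⟩ | ⟨i2, hj1, hj2, hj3, hj4⟩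
    · exact absurd hupH (hall2 H hHm)
    · have hiH : i2 = H := by
        by_contra hne
        rcases Nat.lt_or_ge i2 H with h | h
        · exact hj4 H (by omega) (by omega) hupH
        · exact hmaxH i2 (by omega) hj2 hj3
      subst hiH
      unfold printUnsorted_alt
      rw [if_neg (by omega : ¬ ((arr.length : Int) ≤ 1))]
      rw [hi1, hj1, if_neg (by simp only [beq_iff_eq]; omega)]

-- ===== VERDICT (by name: the statement is the Claim_ definition above) =====
theorem printUnsorted_spec : Claim_equal_printUnsorted := by
  intro arr n _ hpre
  unfold Spec_printUnsorted
  rcases hpre with h1 | hns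
  · -- length-1 array: both programs return [0, 0]
    unfold printUnsorted printUnsorted_alt
    rw [if_pos (by simp [h1]), if_pos (by rw [h1]; norm_num)]
  · -- unsorted array: both return [least Bad index, greatest Up index]
    rw [List.pairwise_iff_getElem] at hns
    push Not at hns
    obtain ⟨i, j, hi, hj, hij, hgt⟩ := hns
    have hgt' : arr.getD j 0 < arr.getD i 0 := by
      rw [List.getD_eq_getElem _ _ hi, List.getD_eq_getElem _ _ hj]; omega
    have hbadi : Bad arr i := ⟨j, hj, hij, hgt'⟩
    have hupj : Up arr j := ⟨i, hij, hgt'⟩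
    have hm : 2 ≤ arr.length := by omega
    haveI : DecidablePred (Bad arr) := fun k => by unfold Bad; infer_instance
    haveI : DecidablePred (Up arr) := fun k => by unfold Up; infer_instance
    have hex : ∃ k, Bad arr k := ⟨i, hbadi⟩
    set L := Nat.find hex with hLdef
    have hbadL : Bad arr L := Nat.find_spec hex
    have hminL : ∀ k, k < L → ¬ Bad arr k := fun k hk => Nat.find_min hex hk
    have hLm : L < arr.length := by
      obtain ⟨j', hj'1, hj'2, _⟩ := hbadL; omega
    set H := Nat.findGreatest (Up arr) (arr.length - 1) with hHdef
    have hupH : Up arr H := Nat.findGreatest_spec (by omega : j ≤ arr.length - 1) hupj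
    have hHm : H < arr.length := by
      have := Nat.findGreatest_le (P := Up arr) (arr.length - 1); omega
    have hmaxH : ∀ k, H < k → k < arr.length → ¬ Up arr k := fun k hk1 hk2 =>
      Nat.findGreatest_is_greatest hk1 (by omega)
    rw [keyA arr n hm L H hLm hHm hbadL hminL hupH hmaxH,
        keyB arr n hm L H hLm hHm hbadL hminL hupH hmaxH]
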